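-- pv_equiv track=rewrite | github.com/childsish/lhc-python | lhc/itertools/merge_sorted.py | get_smallest_indices
-- ===== SOURCE A (Python) =====
-- from typing import Any, Iterator, List, Tuple
--
-- def get_smallest_indices(tops) -> List[int]:
--     smallest = []
--     for i, item in enumerate(tops):
--         if item is None:
--             continue
--
--         if len(smallest) == 0 or item < tops[smallest[0]]:
--             smallest = [i]
--         elif item == tops[smallest[0]]:
--             smallest.append(i)
--     return smallest
-- ===== SOURCE B (Python) =====
-- def get_smallest_indices(tops):
--     min_val = min((item for item in tops if item is not None), default=None)
--     if min_val is None: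
--         return []
--     return [i for i, item in enumerate(tops) if item is not None and item == min_val]
-- ===== Notes on version B (the rewrite author's own statement) =====
-- stated objective: simpler
-- what changed: Replaces A's single combined min-tracking-and-index-collecting scan (which restarts/appends to a candidate list while indexing back into tops) with a reduce-then-filter decomposition: one pass computes the minimum non-None value, a second pass collects the indices equal to it.
import Mathlib
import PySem

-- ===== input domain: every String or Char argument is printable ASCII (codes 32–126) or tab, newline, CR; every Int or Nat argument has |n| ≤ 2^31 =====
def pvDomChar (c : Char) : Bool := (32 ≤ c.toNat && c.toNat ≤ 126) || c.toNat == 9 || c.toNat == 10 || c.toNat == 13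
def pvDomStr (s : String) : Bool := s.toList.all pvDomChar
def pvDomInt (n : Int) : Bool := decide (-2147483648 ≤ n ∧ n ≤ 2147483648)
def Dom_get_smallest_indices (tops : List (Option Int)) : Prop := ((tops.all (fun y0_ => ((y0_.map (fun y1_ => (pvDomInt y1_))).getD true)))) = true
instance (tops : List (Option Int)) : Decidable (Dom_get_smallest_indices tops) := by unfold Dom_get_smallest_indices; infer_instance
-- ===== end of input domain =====

-- B replaces A's combined min-tracking-and-collecting scan with a reduce-then-filter
-- decomposition (compute the minimum non-None value, then collect its indices); same cost.


-- ===== PORT A =====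
-- one loop iteration of A: skip None; restart the candidate list on a strictly
-- smaller item (comparing against tops[smallest[0]]), append on an equal item
def aStep (tops : List (Option Int)) (smallest : List Int) (p : Int × Option Int) : List Int :=
  match p.2 with
  | none => smallest
  | some item =>
    match smallest with
    | [] => [p.1]
    | j :: _ =>
      match PySem.List.pyGet? tops j with
      | some (some w) => if item < w then [p.1] else if item = w then smallest ++ [p.1] else smallest
      | _ => smallest  -- unreachable: smallest only ever holds indices of non-None entries

def aLoop (tops : List (Option Int)) : List (Int × Option Int) → List Int → List Int
  | [], smallest => smallest
  | p :: ps, smallest => aLoop tops ps (aStep tops smallest p)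

def get_smallest_indices (tops : List (Option Int)) : List Int :=
  aLoop tops (PySem.List.enumerate tops 0) []

-- ===== PORT B =====
def get_smallest_indices_alt (tops : List (Option Int)) : List Int :=
  match PySem.List.min? (tops.filterMap id) (fun x => x) with
  | none => []
  | some m => (PySem.List.enumerate tops 0).filterMap
      (fun p => if p.2 = some m then some p.1 else none)

-- ===== PRECONDITION & SPEC =====
def Spec_get_smallest_indices (tops : List (Option Int)) (out : List Int) : Prop := out = get_smallest_indices_alt tops
instance (tops : List (Option Int)) (out : List Int) : Decidable (Spec_get_smallest_indices tops out) := by unfold Spec_get_smallest_indices; infer_instance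

-- ===== CLAIM (what is proved, stated in full; the proofs are below) =====
def Claim_equal_get_smallest_indices : Prop := ∀ (tops : List (Option Int)), Dom_get_smallest_indices tops → Spec_get_smallest_indices tops (get_smallest_indices tops)

-- ===== LEMMAS AND PROOFS =====

-- B's index-collecting pass over a suffix that starts at position k
def idxs (suffix : List (Option Int)) (k : Int) (m : Int) : List Int :=
  (PySem.List.enumerate suffix k).filterMap (fun p => if p.2 = some m then some p.1 else none)

theorem idxs_nil (k m : Int) : idxs [] k m = [] := rfl

theorem idxs_cons (x : Option Int) (rest : List (Option Int)) (k m : Int) :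
    idxs (x :: rest) k m = (if x = some m then [k] else []) ++ idxs rest (k + 1) m := by
  by_cases h : x = some m <;> simp [idxs, PySem.List.enumerate_cons, h]

theorem min?_id_none : PySem.List.min? ([] : List Int) (fun x => x) = none :=
  (PySem.List.min?_eq_none_iff _ _).mpr rfl

theorem min?_id_append_singleton (ys : List Int) (v : Int) :
    PySem.List.min? (ys ++ [v]) (fun x => x) =
      some (match PySem.List.min? ys (fun x => x) with | none => v | some m => min m v) := by
  cases ys with
  | nil => simp [PySem.List.min?_id_cons, min?_id_none]
  | cons y t => simp [PySem.List.min?_id_cons, List.foldl_append]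

-- the loop invariant: the candidate list is empty iff the prefix has no non-None
-- entry, and otherwise its head indexes an occurrence of the prefix minimum
def LoopInv (tops pre : List (Option Int)) (s : List Int) : Prop :=
  match PySem.List.min? (pre.filterMap id) (fun x => x) with
  | none => s = []
  | some m => ∃ j t, s = j :: t ∧ PySem.List.pyGet? tops j = some (some m)

theorem step_key (tops pre rest : List (Option Int)) (x : Option Int) (s : List Int) (m : Int)
    (hpre : tops = pre ++ x :: rest)
    (hmin : PySem.List.min? (tops.filterMap id) (fun y => y) = some m)
    (hinv : LoopInv tops pre s) :
    LoopInv tops (pre ++ [x]) (aStep tops s ((pre.length : Int), x)) ∧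
    (if PySem.List.min? ((pre ++ [x]).filterMap id) (fun y => y) = some m
        then aStep tops s ((pre.length : Int), x) else [])
      = (if PySem.List.min? (pre.filterMap id) (fun y => y) = some m then s else [])
          ++ (if x = some m then [(pre.length : Int)] else []) := by
  have hm_le : ∀ v ∈ tops.filterMap id, m ≤ v := fun v hv => PySem.List.min?_isMin hmin v hv
  cases x with
  | none =>
    constructor
    · simpa [LoopInv, aStep] using hinv
    · simp [aStep]
  | some v =>
    have hvmem : v ∈ tops.filterMap (id : Option Int → Option Int) := by
      rw [hpre]; simp
    have hmv : m ≤ v := hm_le v hvmem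
    have hget : PySem.List.pyGet? tops (pre.length : Int) = some (some v) := by
      rw [hpre]; exact PySem.List.pyGet?_append_length pre rest (some v)
    have hF : (pre ++ [some v]).filterMap (id : Option Int → Option Int)
        = pre.filterMap id ++ [v] := by simp
    cases hP : PySem.List.min? (pre.filterMap id) (fun y => y) with
    | none =>
      have hsnil : s = [] := by unfold LoopInv at hinv; rw [hP] at hinv; exact hinv
      have hpreF : pre.filterMap (id : Option Int → Option Int) = [] :=
        (PySem.List.min?_eq_none_iff _ _).mp hP
      have hstep : aStep tops s ((pre.length : Int), some v) = [(pre.length : Int)] := by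
        rw [hsnil]; simp [aStep]
      constructor
      · unfold LoopInv
        rw [hF, hpreF, hstep]
        simp [PySem.List.min?_id_cons]
        simpa using hget
      · have hv1 : PySem.List.min? ((pre ++ [some v]).filterMap id) (fun y => y) = some v := by
          rw [hF, hpreF]
          simpa using PySem.List.min?_id_cons v []
        rw [hv1, hstep]
        by_cases hvm : v = m <;> simp [hvm]
    | some mold =>
      have hmold_tops : mold ∈ tops.filterMap (id : Option Int → Option Int) := by
        have := PySem.List.min?_mem hP
        rw [hpre]; simp at this ⊢; tauto
      have hm_mold : m ≤ mold := hm_le mold hmold_tops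
      obtain ⟨j, t, hst, hj⟩ : ∃ j t, s = j :: t ∧ PySem.List.pyGet? tops j = some (some mold) := by
        unfold LoopInv at hinv; rw [hP] at hinv; exact hinv
      have hP' : PySem.List.min? ((pre ++ [some v]).filterMap id) (fun y => y) = some (min mold v) := by
        rw [hF, min?_id_append_singleton, hP]
      rcases lt_trichotomy v mold with hlt | heq | hgt
      · -- strictly smaller: restart
        have hstep : aStep tops s ((pre.length : Int), some v) = [(pre.length : Int)] := by
          rw [hst]; simp [aStep, hj, hlt]
        have hminv : min mold v = v := by omega
        have hmoldne : ¬ mold = m := by omega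
        constructor
        · unfold LoopInv; rw [hP', hminv, hstep]
          exact ⟨(pre.length : Int), [], rfl, hget⟩
        · rw [hP', hminv, hstep]
          by_cases hvm : v = m <;> simp [hvm, hmoldne]

      · -- equal: append
        subst heq
        have hstep : aStep tops s ((pre.length : Int), some v) = s ++ [(pre.length : Int)] := by
          rw [hst]; simp [aStep, hj]
        have hminv : min v v = v := by omega
        constructor
        · unfold LoopInv; rw [hP', hminv, hstep, hst]
          exact ⟨j, t ++ [(pre.length : Int)], by simp, hj⟩
        · rw [hP', hminv, hstep]
          by_cases hvm : v = m <;> simp [hvm]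
      · -- strictly larger: unchanged
        have h1 : ¬ v < mold := by omega
        have h2 : ¬ v = mold := by omega
        have hstep : aStep tops s ((pre.length : Int), some v) = s := by
          rw [hst]; simp [aStep, hj, h1, h2]
        have hminv : min mold v = mold := by omega
        have hvne : ¬ v = m := by omega
        constructor
        · unfold LoopInv; rw [hP', hminv, hstep, hst]
          exact ⟨j, t, rfl, hj⟩
        · rw [hP', hminv, hstep]
          simp [hvne]

theorem loop_spec (tops : List (Option Int)) (m : Int)
    (hmin : PySem.List.min? (tops.filterMap id) (fun x => x) = some m) :
    ∀ (suffix pre : List (Option Int)) (s : List Int),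
      tops = pre ++ suffix → LoopInv tops pre s →
      aLoop tops (PySem.List.enumerate suffix (pre.length : Int)) s =
        (if PySem.List.min? (pre.filterMap id) (fun x => x) = some m then s else [])
          ++ idxs suffix (pre.length : Int) m := by
  intro suffix
  induction suffix with
  | nil =>
    intro pre s hpre hinv
    subst hpre
    simp_all [PySem.List.enumerate_nil, aLoop, idxs_nil]
  | cons x rest ih =>
    intro pre s hpre hinv
    obtain ⟨hinv', heq⟩ := step_key tops pre rest x s m hpre hmin hinv
    have hpre' : tops = (pre ++ [x]) ++ rest := by rw [hpre]; simp
    have IH := ih (pre ++ [x]) (aStep tops s ((pre.length : Int), x)) hpre' hinv'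
    have hlen : (((pre ++ [x]).length : Nat) : Int) = (pre.length : Int) + 1 := by
      simp
    rw [hlen] at IH
    rw [PySem.List.enumerate_cons, aLoop, IH, idxs_cons, heq]
    simp [List.append_assoc]

theorem all_none_loop (tops : List (Option Int)) :
    ∀ (suffix : List (Option Int)) (k : Int) (s : List Int),
      (∀ x ∈ suffix, x = none) →
      aLoop tops (PySem.List.enumerate suffix k) s = s := by
  intro suffix
  induction suffix with
  | nil => intro k s _; simp [PySem.List.enumerate_nil, aLoop]
  | cons x rest ih =>
    intro k s hall
    have hx : x = none := hall x (by simp)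
    rw [PySem.List.enumerate_cons, aLoop]
    rw [hx]
    exact ih (k + 1) s (fun y hy => hall y (by simp [hy]))

-- ===== VERDICT (by name: the statement is the Claim_ definition above) =====
theorem get_smallest_indices_spec : Claim_equal_get_smallest_indices := by
  intro tops _
  unfold Spec_get_smallest_indices get_smallest_indices get_smallest_indices_alt
  cases hmin : PySem.List.min? (tops.filterMap id) (fun x => x) with
  | none =>
    have hempty : tops.filterMap (id : Option Int → Option Int) = [] :=
      (PySem.List.min?_eq_none_iff _ _).mp hmin
    have hall : ∀ x ∈ tops, x = none := by
      intro x hx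
      cases x with
      | none => rfl
      | some v =>
        exfalso
        have : v ∈ tops.filterMap (id : Option Int → Option Int) := by
          simp; exact hx
        rw [hempty] at this; simp at this
    exact all_none_loop tops tops 0 [] hall
  | some m =>
    have := loop_spec tops m hmin tops [] [] (by simp) (by unfold LoopInv; rw [show ([] : List (Option Int)).filterMap id = [] from rfl, min?_id_none])
    simpa [idxs, min?_id_none] using this
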